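-- pv_equiv track=rewrite | github.com/TacoRocket/AzureFox | src/azurefox/chains/runner.py | _permission_capability_text
-- ===== SOURCE A (Python) =====
-- def _normalize_role_name(value: str | None) -> str:
--     return " ".join(str(value or "").split()).strip().lower()
--
-- def _permission_capability_text(permission_row: dict | None) -> str:
--     roles = {
--         _normalize_role_name(role)
--         for role in (permission_row or {}).get("high_impact_roles") or []
--     }
--     if "owner" in roles:
--         return "Owner-level Azure control, including role assignment"
--     if "user access administrator" in roles:
--         return "role-assignment control"
--     if "contributor" in roles:
--         return "write/change control"
--     return "meaningful Azure control"
-- ===== SOURCE B (Python) =====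
-- _RANK = {"owner": 0, "user access administrator": 1, "contributor": 2}
-- _TEXTS = [
--     "Owner-level Azure control, including role assignment",
--     "role-assignment control",
--     "write/change control",
--     "meaningful Azure control",
-- ]
--
-- def _permission_capability_text(permission_row):
--     best = 3
--     for role in (permission_row or {}).get("high_impact_roles") or []:
--         rank = _RANK.get(" ".join(str(role or "").split()).strip().lower(), 3)
--         if rank < best:
--             best = rank
--     return _TEXTS[best]
-- ===== Notes on version B (the rewrite author's own statement) =====
-- stated objective: alternative
-- what changed: Replaces the set of normalized roles plus three ordered membership tests with a single min-finding pass that maps each normalized role to a priority rank (owner=0, user access administrator=1, contributor=2, other=3) and indexes a text table by the minimum rank.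
import Mathlib
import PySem

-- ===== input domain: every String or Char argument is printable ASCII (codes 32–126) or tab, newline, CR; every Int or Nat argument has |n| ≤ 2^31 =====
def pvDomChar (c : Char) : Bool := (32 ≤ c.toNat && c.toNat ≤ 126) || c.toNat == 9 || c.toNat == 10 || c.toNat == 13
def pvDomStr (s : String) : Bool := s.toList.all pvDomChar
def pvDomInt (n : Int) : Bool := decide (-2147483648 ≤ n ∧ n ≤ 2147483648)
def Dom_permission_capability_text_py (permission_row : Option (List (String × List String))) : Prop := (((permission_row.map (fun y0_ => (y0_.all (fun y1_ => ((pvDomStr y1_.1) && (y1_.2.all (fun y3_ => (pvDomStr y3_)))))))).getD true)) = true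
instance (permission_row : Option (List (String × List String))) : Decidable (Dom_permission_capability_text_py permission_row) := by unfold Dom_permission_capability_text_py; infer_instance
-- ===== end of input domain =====

-- B replaces A's set-plus-ordered-membership-tests with a single min-rank pass over the roles; same return value, no speed claim.
-- ===== PORT A =====
-- shared helper: Python's `" ".join(str(value or "").split()).strip().lower()` (A's _normalize_role_name;
-- the identical expression appears inline in B's loop)
def pvNormRole (value : String) : String :=
  let v := if value == "" then "" else value
  PySem.Str.lower (PySem.Str.strip (PySem.Str.join " " (PySem.Str.split₀ v)))

-- shared helper: Python's `(permission_row or {}).get("high_impact_roles") or []` (identical in both programs)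
def pvRolesSrc (permission_row : Option (List (String × List String))) : List String :=
  let d : PySem.Dict String (List String) :=
    PySem.Dict.mk (match permission_row with | some m => m | none => [])
  match PySem.Dict.get? d "high_impact_roles" with
  | some l => if l.isEmpty then [] else l
  | none => []

def permission_capability_text_py (permission_row : Option (List (String × List String))) : String :=
  let roles : PySem.Set String := PySem.Set.ofList ((pvRolesSrc permission_row).map pvNormRole)
  if PySem.Set.contains roles "owner" then "Owner-level Azure control, including role assignment"
  else if PySem.Set.contains roles "user access administrator" then "role-assignment control"
  else if PySem.Set.contains roles "contributor" then "write/change control"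
  else "meaningful Azure control"

-- ===== PORT B =====
def pvRankDict : PySem.Dict String Nat :=
  PySem.Dict.mk [("owner", 0), ("user access administrator", 1), ("contributor", 2)]

def pvTexts : List String :=
  ["Owner-level Azure control, including role assignment",
   "role-assignment control",
   "write/change control",
   "meaningful Azure control"]

def permission_capability_text_py_alt (permission_row : Option (List (String × List String))) : String :=
  let best :=
    (pvRolesSrc permission_row).foldl
      (fun b role =>
        let rank := PySem.Dict.getD pvRankDict (pvNormRole role) 3
        if rank < b then rank else b) 3
  pvTexts.getD best ""

-- ===== PRECONDITION & SPEC =====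
def Spec_permission_capability_text_py (permission_row : Option (List (String × List String))) (out : String) : Prop := out = permission_capability_text_py_alt permission_row
instance (permission_row : Option (List (String × List String))) (out : String) : Decidable (Spec_permission_capability_text_py permission_row out) := by unfold Spec_permission_capability_text_py; infer_instance

-- ===== CLAIM (what is proved, stated in full; the proofs are below) =====
def Claim_equal_permission_capability_text_py : Prop := ∀ (permission_row : Option (List (String × List String))), Dom_permission_capability_text_py permission_row → Spec_permission_capability_text_py permission_row (permission_capability_text_py permission_row)

-- ===== LEMMAS AND PROOFS =====
-- the ordered-membership answer of A, as a rank in 0..3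
def pvBest (N : List String) : Nat :=
  if "owner" ∈ N then 0
  else if "user access administrator" ∈ N then 1
  else if "contributor" ∈ N then 2
  else 3

-- the rank B's dict lookup assigns to one normalized name
def pvRankOf (n : String) : Nat :=
  if "owner" = n then 0
  else if "user access administrator" = n then 1
  else if "contributor" = n then 2
  else 3

lemma pvRank_eq (n : String) : PySem.Dict.getD pvRankDict n 3 = pvRankOf n := by
  simp only [pvRankDict, PySem.Dict.getD, PySem.Dict.get?, List.find?]
  cases h1 : ("owner" == n) <;> cases h2 : ("user access administrator" == n) <;>
    cases h3 : ("contributor" == n) <;> simp_all [pvRankOf]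

lemma pvRankOf_le (n : String) : pvRankOf n ≤ 3 := by
  unfold pvRankOf; split_ifs <;> omega

lemma pvBest_le (N : List String) : pvBest N ≤ 3 := by
  unfold pvBest; split_ifs <;> omega

lemma pvBest_cons (n : String) (N : List String) :
    pvBest (n :: N) = min (pvRankOf n) (pvBest N) := by
  unfold pvBest pvRankOf
  simp only [List.mem_cons]
  by_cases h1 : "owner" = n <;> by_cases h2 : "user access administrator" = n <;>
    by_cases h3 : "contributor" = n <;> simp_all [eq_comm] <;> split_ifs <;> omega

lemma pvFold_eq (L : List String) (b : Nat) (hb : b ≤ 3) :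
    L.foldl (fun b role =>
        let rank := PySem.Dict.getD pvRankDict (pvNormRole role) 3
        if rank < b then rank else b) b
      = min b (pvBest (L.map pvNormRole)) := by
  induction L generalizing b with
  | nil => simp [pvBest]; omega
  | cons x xs ih =>
    simp only [List.foldl_cons, List.map_cons, pvBest_cons]
    rw [ih]
    · rw [pvRank_eq]
      have h := pvBest_le (xs.map pvNormRole)
      have h' := pvRankOf_le (pvNormRole x)
      split_ifs <;> omega
    · rw [pvRank_eq]
      have h' := pvRankOf_le (pvNormRole x)
      split_ifs <;> omega

-- ===== VERDICT (by name: the statement is the Claim_ definition above) =====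
theorem permission_capability_text_py_spec : Claim_equal_permission_capability_text_py := by
  intro row _
  unfold Spec_permission_capability_text_py permission_capability_text_py permission_capability_text_py_alt
  rw [pvFold_eq _ 3 (le_refl 3)]
  have hle := pvBest_le ((pvRolesSrc row).map pvNormRole)
  have h3 : min 3 (pvBest ((pvRolesSrc row).map pvNormRole))
      = pvBest ((pvRolesSrc row).map pvNormRole) := by omega
  rw [h3]
  set N := (pvRolesSrc row).map pvNormRole with hN
  by_cases h1 : "owner" ∈ N <;> by_cases h2 : "user access administrator" ∈ N <;>
    by_cases hc : "contributor" ∈ N <;>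
      simp [pvBest, PySem.Set.contains, PySem.Set.mem_ofList, h1, h2, hc, pvTexts]
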